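-- pv_equiv track=rewrite | github.com/Bonifatius94/aoc2023 | 03_1/main.py | find_digit_bounds
-- ===== SOURCE A (Python) =====
-- from typing import List, Tuple
--
-- def find_digit_bounds(lines: List[str]) -> Tuple[List[Tuple[int, int]], List[Tuple[int, int]]]:
--     char_pairs = lambda line: zip([None] + [c for c in line], [c for c in line] + [None])
--
--     start_pos = [(col, row)
--                  for row, line in enumerate(lines)
--                  for col, (c1, c2) in enumerate(char_pairs(line))
--                  if (c1 is None and c2.isdigit()) or (c1 is not None and c2 is not None \
--                                                       and not c1.isdigit() and c2.isdigit())]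
--
--     end_pos = [(col, row)
--                for row, line in enumerate(lines)
--                for col, (c1, c2) in enumerate(char_pairs(line))
--                if (c2 is None and c1.isdigit()) or (c1 is not None and c2 is not None \
--                                                     and c1.isdigit() and not c2.isdigit())]
--
--     return start_pos, end_pos
-- ===== SOURCE B (Python) =====
-- from typing import List, Tuple
--
-- def find_digit_bounds(lines: List[str]) -> Tuple[List[Tuple[int, int]], List[Tuple[int, int]]]:
--     starts: List[Tuple[int, int]] = []
--     ends: List[Tuple[int, int]] = []
--     for row, line in enumerate(lines):
--         in_run = False
--         for col, ch in enumerate(line):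
--             d = ch.isdigit()
--             if d and not in_run:
--                 starts.append((col, row))
--             if in_run and not d:
--                 ends.append((col, row))
--             in_run = d
--         if in_run:
--             ends.append((len(line), row))
--     return starts, ends
-- ===== Notes on version B (the rewrite author's own statement) =====
-- stated objective: simpler
-- what changed: Replaces A's two zip-of-shifted-copies pair comprehensions (one full pass building (prev,cur) pair lists for starts, a second one for ends) with a single stateful left-to-right scan per line carrying an in_digit flag that emits run starts and ends in one pass.
import Mathlib
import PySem

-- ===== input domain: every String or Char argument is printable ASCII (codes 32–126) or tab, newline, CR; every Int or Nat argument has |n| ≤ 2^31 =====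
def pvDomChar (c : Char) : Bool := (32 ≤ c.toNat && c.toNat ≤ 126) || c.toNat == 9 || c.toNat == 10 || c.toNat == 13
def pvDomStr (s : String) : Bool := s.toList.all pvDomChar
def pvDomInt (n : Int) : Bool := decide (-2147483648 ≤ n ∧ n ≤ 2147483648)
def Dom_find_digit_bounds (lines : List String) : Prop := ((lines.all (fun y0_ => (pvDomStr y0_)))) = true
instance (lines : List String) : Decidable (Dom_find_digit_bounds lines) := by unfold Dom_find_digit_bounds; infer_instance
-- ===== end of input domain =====

-- B replaces A's two zip-based pair comprehensions with one stateful pass per line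
-- carrying an in_digit flag (objective: simpler).

-- ===== PORT A =====
def pvCharPairs (cs : List Char) : List (Option Char × Option Char) :=
  (none :: cs.map some).zip (cs.map some ++ [none])

def pvStartCond : Option Char × Option Char → Bool
  | (none, some c2) => PySem.Chars.isdigit c2
  | (some c1, some c2) => !PySem.Chars.isdigit c1 && PySem.Chars.isdigit c2
  | _ => false

def pvEndCond : Option Char × Option Char → Bool
  | (some c1, none) => PySem.Chars.isdigit c1
  | (some c1, some c2) => PySem.Chars.isdigit c1 && !PySem.Chars.isdigit c2
  | _ => false

def find_digit_bounds (lines : List String) : (List (Int × Int)) × (List (Int × Int)) :=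
  let startPos := (PySem.List.enumerate lines).flatMap (fun rl =>
    (PySem.List.enumerate (pvCharPairs rl.2.toList)).filterMap
      (fun cp => if pvStartCond cp.2 then some (cp.1, rl.1) else none))
  let endPos := (PySem.List.enumerate lines).flatMap (fun rl =>
    (PySem.List.enumerate (pvCharPairs rl.2.toList)).filterMap
      (fun cp => if pvEndCond cp.2 then some (cp.1, rl.1) else none))
  (startPos, endPos)

-- ===== PORT B =====
def pvAltInnerStep (row : Int) (st : ((List (Int × Int)) × (List (Int × Int))) × Bool)
    (cp : Int × Char) : ((List (Int × Int)) × (List (Int × Int))) × Bool :=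
  let d := PySem.Chars.isdigit cp.2
  let starts := if d && !st.2 then st.1.1 ++ [(cp.1, row)] else st.1.1
  let ends := if st.2 && !d then st.1.2 ++ [(cp.1, row)] else st.1.2
  ((starts, ends), d)

def pvAltLineStep (acc : (List (Int × Int)) × (List (Int × Int))) (rl : Int × String) :
    (List (Int × Int)) × (List (Int × Int)) :=
  let st := (PySem.List.enumerate rl.2.toList).foldl (pvAltInnerStep rl.1) (acc, false)
  let ends := if st.2 then st.1.2 ++ [(PySem.Str.len rl.2, rl.1)] else st.1.2
  (st.1.1, ends)

def find_digit_bounds_alt (lines : List String) : (List (Int × Int)) × (List (Int × Int)) :=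
  (PySem.List.enumerate lines).foldl pvAltLineStep ([], [])

-- ===== PRECONDITION & SPEC =====
-- Pre_ excludes exactly the inputs on which Python A raises: any list containing an
-- empty line makes A evaluate None.isdigit() (AttributeError).
def Pre_find_digit_bounds (lines : List String) : Prop := "" ∉ lines
instance (lines : List String) : Decidable (Pre_find_digit_bounds lines) := by
  unfold Pre_find_digit_bounds; infer_instance

def pvWitness_find_digit_bounds : List String := ["a12b3", "7", "xx"]

def Spec_find_digit_bounds (lines : List String) (out : (List (Int × Int)) × (List (Int × Int))) : Prop := out = find_digit_bounds_alt lines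
instance (lines : List String) (out : (List (Int × Int)) × (List (Int × Int))) : Decidable (Spec_find_digit_bounds lines out) := by unfold Spec_find_digit_bounds; infer_instance

-- ===== CLAIM (what is proved, stated in full; the proofs are below) =====
def Claim_equal_find_digit_bounds : Prop := ∀ (lines : List String), Dom_find_digit_bounds lines → Pre_find_digit_bounds lines → Spec_find_digit_bounds lines (find_digit_bounds lines)

-- ===== LEMMAS AND PROOFS =====

-- per-line reference functions (proof-side only)
def pvStartsOf (row : Int) : Int → Bool → List Char → List (Int × Int)
  | _, _, [] => []
  | i, prev, c :: cs =>
    (if PySem.Chars.isdigit c && !prev then [(i, row)] else []) ++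
      pvStartsOf row (i + 1) (PySem.Chars.isdigit c) cs

def pvEndsInner (row : Int) : Int → Bool → List Char → List (Int × Int)
  | _, _, [] => []
  | i, prev, c :: cs =>
    (if prev && !PySem.Chars.isdigit c then [(i, row)] else []) ++
      pvEndsInner row (i + 1) (PySem.Chars.isdigit c) cs

def pvFinFlag : Bool → List Char → Bool
  | prev, [] => prev
  | _, c :: cs => pvFinFlag (PySem.Chars.isdigit c) cs

def pvEndsOf (row i : Int) (prev : Bool) (cs : List Char) : List (Int × Int) :=
  pvEndsInner row i prev cs ++
    (if pvFinFlag prev cs then [(i + cs.length, row)] else [])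

def pvPairsFrom (p : Option Char) (cs : List Char) : List (Option Char × Option Char) :=
  (p :: cs.map some).zip (cs.map some ++ [none])

def pvPrevD : Option Char → Bool
  | none => false
  | some c => PySem.Chars.isdigit c

theorem pvPairsFrom_nil (p : Option Char) : pvPairsFrom p [] = [(p, none)] := by
  simp [pvPairsFrom]

theorem pvPairsFrom_cons (p : Option Char) (c : Char) (cs : List Char) :
    pvPairsFrom p (c :: cs) = (p, some c) :: pvPairsFrom (some c) cs := by
  simp [pvPairsFrom]

theorem pvA_start (row : Int) (cs : List Char) : ∀ (p : Option Char) (i : Int),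
    (PySem.List.enumerate (pvPairsFrom p cs) i).filterMap
      (fun cp => if pvStartCond cp.2 then some (cp.1, row) else none)
      = pvStartsOf row i (pvPrevD p) cs := by
  induction cs with
  | nil =>
    intro p i
    rw [pvPairsFrom_nil, PySem.List.enumerate_cons, PySem.List.enumerate_nil,
      List.filterMap_cons]
    have hc : pvStartCond (p, none) = false := by cases p <;> simp [pvStartCond]
    simp [hc, pvStartsOf]
  | cons c cs ih =>
    intro p i
    rw [pvPairsFrom_cons, PySem.List.enumerate_cons, List.filterMap_cons, ih]
    have hc : pvStartCond (p, some c) = (PySem.Chars.isdigit c && !pvPrevD p) := by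
      cases p <;> simp [pvStartCond, pvPrevD, Bool.and_comm]
    have hp : pvPrevD (some c) = PySem.Chars.isdigit c := rfl
    rw [hc, hp]
    by_cases h : (PySem.Chars.isdigit c && !pvPrevD p) = true <;>
      simp [pvStartsOf, h]

theorem pvA_end (row : Int) (cs : List Char) : ∀ (p : Option Char) (i : Int),
    (PySem.List.enumerate (pvPairsFrom p cs) i).filterMap
      (fun cp => if pvEndCond cp.2 then some (cp.1, row) else none)
      = pvEndsOf row i (pvPrevD p) cs := by
  induction cs with
  | nil =>
    intro p i
    rw [pvPairsFrom_nil, PySem.List.enumerate_cons, PySem.List.enumerate_nil,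
      List.filterMap_cons]
    have hc : pvEndCond (p, none) = pvPrevD p := by cases p <;> simp [pvEndCond, pvPrevD]
    rw [hc]
    by_cases h : pvPrevD p = true <;>
      simp [h, pvEndsOf, pvEndsInner, pvFinFlag]
  | cons c cs ih =>
    intro p i
    rw [pvPairsFrom_cons, PySem.List.enumerate_cons, List.filterMap_cons, ih]
    have hc : pvEndCond (p, some c) = (pvPrevD p && !PySem.Chars.isdigit c) := by
      cases p <;> simp [pvEndCond, pvPrevD, Bool.and_comm]
    have hp : pvPrevD (some c) = PySem.Chars.isdigit c := rfl
    rw [hc, hp]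
    have harith : i + 1 + ((cs.length : Int)) = i + ((cs.length : Int) + 1) := by ring
    by_cases h : (pvPrevD p && !PySem.Chars.isdigit c) = true <;>
      simp [pvEndsOf, pvEndsInner, pvFinFlag, h, harith]

theorem pvB_inner (row : Int) (cs : List Char) :
    ∀ (i : Int) (prev : Bool) (s e : List (Int × Int)),
    (PySem.List.enumerate cs i).foldl (pvAltInnerStep row) ((s, e), prev)
      = ((s ++ pvStartsOf row i prev cs, e ++ pvEndsInner row i prev cs),
          pvFinFlag prev cs) := by
  induction cs with
  | nil => intro i prev s e; simp [PySem.List.enumerate_nil, pvStartsOf, pvEndsInner, pvFinFlag]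
  | cons c cs ih =>
    intro i prev s e
    rw [PySem.List.enumerate_cons, List.foldl_cons, pvAltInnerStep, ih]
    simp only [pvStartsOf, pvEndsInner, pvFinFlag]
    split <;> split <;> simp

theorem pvB_line (acc : (List (Int × Int)) × (List (Int × Int))) (rl : Int × String) :
    pvAltLineStep acc rl
      = (acc.1 ++ pvStartsOf rl.1 0 false rl.2.toList,
         acc.2 ++ pvEndsOf rl.1 0 false rl.2.toList) := by
  obtain ⟨s, e⟩ := acc
  rw [pvAltLineStep]
  rw [pvB_inner]
  simp only [pvEndsOf, PySem.Str.len_eq]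
  split <;> simp_all

theorem pvB_outer (ls : List String) : ∀ (r : Int) (s e : List (Int × Int)),
    (PySem.List.enumerate ls r).foldl pvAltLineStep (s, e)
      = (s ++ (PySem.List.enumerate ls r).flatMap
            (fun rl => pvStartsOf rl.1 0 false rl.2.toList),
         e ++ (PySem.List.enumerate ls r).flatMap
            (fun rl => pvEndsOf rl.1 0 false rl.2.toList)) := by
  induction ls with
  | nil => intro r s e; simp [PySem.List.enumerate_nil]
  | cons l ls ih =>
    intro r s e
    rw [PySem.List.enumerate_cons, List.foldl_cons, pvB_line, ih]
    simp

-- ===== VERDICT (by name: the statement is the Claim_ definition above) =====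
theorem find_digit_bounds_spec : Claim_equal_find_digit_bounds := by
  intro lines _ _
  unfold Spec_find_digit_bounds find_digit_bounds find_digit_bounds_alt
  rw [pvB_outer]
  refine Prod.ext ?_ ?_ <;> simp only [List.nil_append] <;>
    exact List.flatMap_congr (fun rl _ => by
      first
        | exact pvA_start rl.1 rl.2.toList none 0
        | exact pvA_end rl.1 rl.2.toList none 0)
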